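-- pv_equiv track=rewrite | github.com/shlim1392/Coding_p | Python/백준/Bronze/31995. 게임말 올려놓기/게임말 올려놓기.py | count_diagonal_neighbors
-- ===== SOURCE A (Python) =====
-- def count_diagonal_neighbors(N, M):
--     count = 0
--     for i in range(N - 1):
--         for j in range(M - 1):
--             count += 1
--
--     for i in range(N - 1):
--         for j in range(1, M):
--             count += 1
--
--     return count
-- ===== SOURCE B (Python) =====
-- def count_diagonal_neighbors(N, M):
--     # closed form: each of the two loops contributes (N-1)*(M-1) when both factors positive
--     return 2 * max(N - 1, 0) * max(M - 1, 0)
-- ===== Notes on version B (the rewrite author's own statement) =====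
-- stated objective: faster
-- what changed: Replaced the two nested counting loops with the closed form 2*max(N-1,0)*max(M-1,0).
import Mathlib
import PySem

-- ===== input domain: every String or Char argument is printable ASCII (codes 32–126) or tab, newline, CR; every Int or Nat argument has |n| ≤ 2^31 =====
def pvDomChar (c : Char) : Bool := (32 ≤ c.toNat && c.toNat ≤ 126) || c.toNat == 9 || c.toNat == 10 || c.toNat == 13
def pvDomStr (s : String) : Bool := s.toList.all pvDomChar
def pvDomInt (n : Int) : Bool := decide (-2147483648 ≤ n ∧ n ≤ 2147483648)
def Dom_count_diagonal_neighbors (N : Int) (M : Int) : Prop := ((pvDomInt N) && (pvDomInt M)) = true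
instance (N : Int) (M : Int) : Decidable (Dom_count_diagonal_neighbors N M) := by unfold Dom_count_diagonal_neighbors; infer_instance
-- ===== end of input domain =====

-- ===== PORT A =====
def count_diagonal_neighbors (N : Int) (M : Int) : Int :=
  let count : Int := 0
  let count := (PySem.List.pyRange 0 (N - 1) 1).foldl
    (fun count _i => (PySem.List.pyRange 0 (M - 1) 1).foldl (fun count _j => count + 1) count) count
  let count := (PySem.List.pyRange 0 (N - 1) 1).foldl
    (fun count _i => (PySem.List.pyRange 1 M 1).foldl (fun count _j => count + 1) count) count
  count

-- ===== PORT B =====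
-- B: closed form, O(1)
def count_diagonal_neighbors_alt (N : Int) (M : Int) : Int :=
  2 * max (N - 1) 0 * max (M - 1) 0

-- ===== PRECONDITION & SPEC =====
def Spec_count_diagonal_neighbors (N : Int) (M : Int) (out : Int) : Prop := out = count_diagonal_neighbors_alt N M
instance (N : Int) (M : Int) (out : Int) : Decidable (Spec_count_diagonal_neighbors N M out) := by unfold Spec_count_diagonal_neighbors; infer_instance

-- ===== CLAIM (what is proved, stated in full; the proofs are below) =====
def Claim_equal_count_diagonal_neighbors : Prop := ∀ (N : Int) (M : Int), Dom_count_diagonal_neighbors N M → Spec_count_diagonal_neighbors N M (count_diagonal_neighbors N M)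

-- ===== LEMMAS AND PROOFS =====

-- ===== VERDICT (by name: the statement is the Claim_ definition above) =====
theorem pv_fold_len (l : List Int) (c : Int) :
    l.foldl (fun c _ => c + 1) c = c + l.length := by
  induction l generalizing c with
  | nil => simp
  | cons x xs ih => simp only [List.foldl_cons, ih, List.length_cons]; push_cast; ring

theorem pv_fold_nested (outer inner : List Int) (c : Int) :
    outer.foldl (fun c _ => inner.foldl (fun c _ => c + 1) c) c
      = c + outer.length * inner.length := by
  induction outer generalizing c with
  | nil => simp
  | cons x xs ih =>
    rw [List.foldl_cons, ih, pv_fold_len, List.length_cons]; push_cast; ring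

theorem count_diagonal_neighbors_spec : Claim_equal_count_diagonal_neighbors := by
  intro N M _
  unfold Spec_count_diagonal_neighbors count_diagonal_neighbors count_diagonal_neighbors_alt
  simp only [pv_fold_nested, PySem.List.length_pyRange_one, Int.toNat_eq_max]
  ring_nf
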